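-- pv_equiv track=rewrite | github.com/beratakman/Python_Project | Example 2/proje.py | bTitle
-- ===== SOURCE A (Python) =====
-- def bTitle(text): #title fonksiyonu düzelten kod
--     newtext = ""
--     for word in str(text).split(" "):
--         newStr = "" #her döngüde kelimeyi sıfırlıyoruz
--         countChar = 0 #her döngüde karakter sayasıcını sıfıra eşitledim
--         for char in word:
--             countChar = countChar + 1 #karakterleri sayarken sayacı bir bir artırıyorum
--             if (countChar == 1): #bu durumda sayaç 1 eşit ise ilk karakter demektir.
--                 if (char == "i"): #ilk karakter büyük İ varsa aptal yazılım bunu küçük i ye çevirdiği için biz kartakteri manuel olarak büyük i yapacağız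
--                     char = "İ" #büyük İ yapıyroruz
--             else: #değilse diğer karakterlerdir
--                 if (char == "I"): #diğer karakter küçük harf olacağı için bu sefrde büyük I karakterini küçük ı karakterine çeviriyouz
--                     char = "ı" #küçük ı yapıyrouz
--             newStr = newStr + char #sonra her karateri tek tek değişkene atıyrouz
--         newtext = newtext + " " + newStr.capitalize() # değişkene atadığımız karakterleri aralarında boşluk oalcak şekilde yeni değişkene atıryouz
--     return newtext.strip() #yukarıda karakter atmasında ortaya çıkan ilk karakter boşluğu siplit vasıtası ile temizliyoruz
-- ===== SOURCE B (Python) =====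
-- def bTitle(text):
--     def fix(word):
--         if not word:
--             return ""
--         head = "İ" if word[0] == "i" else word[0]
--         return (head + word[1:].replace("I", "ı")).capitalize()
--     return " ".join(fix(w) for w in str(text).split(" ")).strip()
-- ===== Notes on version B (the rewrite author's own statement) =====
-- stated objective: simpler
-- what changed: Replaces A's per-character counter loop and quadratic string accumulation with per-word slicing (head substitution i to dotted capital I, tail str.replace of capital I by dotless i) plus capitalize, assembled with a single join and strip.
import Mathlib
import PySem

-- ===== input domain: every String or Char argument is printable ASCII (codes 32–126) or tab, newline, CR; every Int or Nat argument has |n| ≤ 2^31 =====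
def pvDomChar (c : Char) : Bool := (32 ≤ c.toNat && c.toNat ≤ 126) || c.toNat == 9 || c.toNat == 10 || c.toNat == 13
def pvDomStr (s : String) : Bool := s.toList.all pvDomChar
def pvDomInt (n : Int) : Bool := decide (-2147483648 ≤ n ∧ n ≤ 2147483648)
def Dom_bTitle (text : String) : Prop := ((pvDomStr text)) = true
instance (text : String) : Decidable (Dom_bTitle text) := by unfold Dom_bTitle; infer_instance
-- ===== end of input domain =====

-- B: same Turkish-aware title case, but per word via head substitution + tail replace + capitalize
-- and ' '.join(...).strip(), instead of A's per-character counter loop (objective: simpler).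

-- Shared helper: Python's str.capitalize (first char titlecased, rest lowercased).  Exact for the
-- strings both programs apply it to here: first char ASCII or 'İ' (titlecase of 'İ' is 'İ' and
-- upperChar leaves non-ASCII unchanged), remaining chars ASCII or 'ı' (lowerChar leaves 'ı' unchanged).
def pyCapitalize (cs : List Char) : List Char :=
  match cs with
  | [] => []
  | h :: t => PySem.Chars.upperChar h :: t.map PySem.Chars.lowerChar

-- ===== PORT A =====
-- the inner per-character loop of A: state = (newStr, countChar)
def bTitleStep (st : List Char × Int) (char : Char) : List Char × Int :=
  let countChar := st.2 + 1
  let char' :=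
    if countChar = 1 then (if char = 'i' then 'İ' else char)
    else (if char = 'I' then 'ı' else char)
  (st.1 ++ [char'], countChar)

def bTitle (text : String) : String :=
  let newtext :=
    (PySem.Chars.splitOn text.toList [' ']).foldl
      (fun newtext word =>
        let st := word.foldl bTitleStep ([], 0)
        newtext ++ [' '] ++ pyCapitalize st.1)
      []
  String.mk (PySem.Chars.strip newtext)

-- ===== PORT B =====
-- fix(word): empty word stays '', else substitute head i→İ, replace I→ı in the tail, capitalize
def bTitleFix (word : List Char) : List Char :=
  match word with
  | [] => []
  | h :: t => pyCapitalize ((if h = 'i' then 'İ' else h) :: PySem.Chars.replace t ['I'] ['ı'])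

def bTitle_alt (text : String) : String :=
  String.mk (PySem.Chars.strip
    (PySem.Chars.join [' '] ((PySem.Chars.splitOn text.toList [' ']).map bTitleFix)))

-- ===== PRECONDITION & SPEC =====
def Spec_bTitle (text : String) (out : String) : Prop := out = bTitle_alt text
instance (text : String) (out : String) : Decidable (Spec_bTitle text out) := by unfold Spec_bTitle; infer_instance

-- ===== CLAIM (what is proved, stated in full; the proofs are below) =====
def Claim_equal_bTitle : Prop := ∀ (text : String), Dom_bTitle text → Spec_bTitle text (bTitle text)

-- ===== LEMMAS AND PROOFS =====

-- tail substitution of A's inner loop, as a single map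
def bTitleSub2 (c : Char) : Char := if c = 'I' then 'ı' else c

theorem bTitle_inner_tail (t : List Char) (acc : List Char) (n : Int) (hn : 1 ≤ n) :
    (t.foldl bTitleStep (acc, n)).1 = acc ++ t.map bTitleSub2 := by
  induction t generalizing acc n with
  | nil => simp
  | cons c t ih =>
    have h1 : ¬ (n + 1 = 1) := by omega
    simp only [List.foldl_cons, bTitleStep, if_neg h1]
    rw [ih _ _ (by omega)]
    simp [bTitleSub2]

theorem bTitle_replace_go (fuel : Nat) (t acc : List Char) (h : t.length ≤ fuel) :
    PySem.Chars.replace.go ['I'] ['ı'] fuel t acc = acc.reverse ++ t.map bTitleSub2 := by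
  induction fuel generalizing t acc with
  | zero =>
    cases t with
    | nil => simp [PySem.Chars.replace.go]
    | cons c t => simp at h
  | succ fuel ih =>
    cases t with
    | nil => simp [PySem.Chars.replace.go]
    | cons c t =>
      have h' : t.length ≤ fuel := by simp at h; omega
      by_cases hc : c = 'I'
      · subst hc
        have hp : List.isPrefixOf ['I'] ('I' :: t) = true := by simp [List.isPrefixOf]
        simp only [PySem.Chars.replace.go, hp, if_pos, List.length_singleton,
          List.drop_succ_cons, List.drop_zero, List.reverse_singleton, List.singleton_append]
        rw [ih t _ h']
        simp [bTitleSub2]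
      · have hp : List.isPrefixOf ['I'] (c :: t) = false := by
          simp only [List.isPrefixOf, Bool.and_eq_false_iff, beq_eq_false_iff_ne, ne_eq]
          exact Or.inl fun h => hc h.symm
        simp only [PySem.Chars.replace.go, hp, Bool.false_eq_true, if_false]
        rw [ih t _ h']
        simp [bTitleSub2, hc]

theorem bTitle_replace (t : List Char) :
    PySem.Chars.replace t ['I'] ['ı'] = t.map bTitleSub2 := by
  simp only [PySem.Chars.replace, List.isEmpty_cons, Bool.false_eq_true, if_false]
  exact bTitle_replace_go t.length t [] le_rfl

-- per word, A's inner loop + capitalize equals B's fix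
theorem bTitle_word (w : List Char) :
    pyCapitalize (w.foldl bTitleStep ([], 0)).1 = bTitleFix w := by
  cases w with
  | nil => simp [bTitleFix, pyCapitalize]
  | cons h t =>
    simp only [List.foldl_cons, bTitleStep]
    norm_num
    rw [bTitle_inner_tail t _ 1 le_rfl, bTitleFix, bTitle_replace]
    simp [pyCapitalize]

-- the outer accumulation, flattened
theorem bTitle_foldl_flat (ws : List (List Char)) (f : List Char → List Char) (acc : List Char) :
    ws.foldl (fun newtext word => newtext ++ [' '] ++ f word) acc
      = acc ++ ws.flatMap (fun w => ' ' :: f w) := by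
  induction ws generalizing acc with
  | nil => simp
  | cons w ws ih =>
    simp only [List.foldl_cons]
    rw [ih]
    simp [List.flatMap]

theorem bTitle_join_flat (w : List Char) (ws : List (List Char)) :
    PySem.Chars.join [' '] (w :: ws) = w ++ ws.flatMap (fun v => ' ' :: v) := by
  induction ws generalizing w with
  | nil => simp [PySem.Chars.join, List.intercalate]
  | cons v ws ih =>
    simp only [PySem.Chars.join, List.intercalate] at *
    simp [List.intersperse] at *
    simp [ih]

theorem bTitle_strip_space (s : List Char) :
    PySem.Chars.strip (' ' :: s) = PySem.Chars.strip s := by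
  simp [PySem.Chars.strip, PySem.Chars.lstrip, List.dropWhile, PySem.Chars.isspace]

-- ===== VERDICT (by name: the statement is the Claim_ definition above) =====
theorem bTitle_spec : Claim_equal_bTitle := by
  intro text _
  show bTitle text = bTitle_alt text
  unfold bTitle bTitle_alt
  cases hws : PySem.Chars.splitOn text.toList [' '] with
  | nil => simp [PySem.Chars.join, List.intercalate]
  | cons w ws =>
    rw [bTitle_foldl_flat, List.map_cons, bTitle_join_flat, List.nil_append]
    simp only [List.flatMap_cons]
    rw [bTitle_word w]
    have hmap : (ws.flatMap fun w => ' ' :: pyCapitalize (w.foldl bTitleStep ([], 0)).1)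
              = ((ws.map bTitleFix).flatMap fun v => ' ' :: v) := by
      simp only [List.flatMap_map]
      exact List.flatMap_congr (fun w _ => by rw [bTitle_word])
    rw [hmap, List.cons_append, bTitle_strip_space]
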